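-- pv_equiv track=rewrite | github.com/alderney2023/Algorithm_Foundations | 12.BFR_and_DP/Code11_BRF_DP_凑钱最少用量.py | process
-- ===== SOURCE A (Python) =====
-- def process(choices, i, rest):
--     if rest < 0:
--         return -1
--     if rest == 0:
--         return 0
--     if i == len(choices):
--         return -1
--
--     no = yes = -1
--     no = process(choices, i+1, rest)
--     yes = process(choices, i+1, rest - choices[i])
--
--     if yes == -1 and no == -1:
--         return -1
--     elif yes == -1:
--         return no
--     elif no == -1:
--         return yes+1
--     else:
--         return min(1+yes, no)
-- ===== SOURCE B (Python) =====
-- def process(choices, i, rest):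
--     # Forward sweep: one pass over the coins, keeping a dict that maps each
--     # reachable remaining amount (> 0) to the fewest coins used to reach it.
--     if rest < 0:
--         return -1
--     if rest == 0:
--         return 0
--     n = len(choices)
--     best = -1
--     states = {rest: 0}
--     j = i
--     while j < n:
--         c = choices[j]
--         new = dict(states)
--         for r, k in states.items():
--             nr = r - c
--             if nr < 0:
--                 continue
--             if nr == 0:
--                 if best == -1 or k + 1 < best:
--                     best = k + 1
--             else:
--                 new[nr] = min(new.get(nr, k + 1), k + 1)
--         states = new
--         j += 1
--     return best
-- ===== Notes on version B (the rewrite author's own statement) =====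
-- stated objective: alternative
-- what changed: B replaces A's top-down double recursion by a single forward sweep over the coins that maintains a dict mapping each reachable remaining amount to the fewest coins used, processing each (coin, reachable remaining amount) pair once instead of re-exploring shared subtrees.
import Mathlib
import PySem

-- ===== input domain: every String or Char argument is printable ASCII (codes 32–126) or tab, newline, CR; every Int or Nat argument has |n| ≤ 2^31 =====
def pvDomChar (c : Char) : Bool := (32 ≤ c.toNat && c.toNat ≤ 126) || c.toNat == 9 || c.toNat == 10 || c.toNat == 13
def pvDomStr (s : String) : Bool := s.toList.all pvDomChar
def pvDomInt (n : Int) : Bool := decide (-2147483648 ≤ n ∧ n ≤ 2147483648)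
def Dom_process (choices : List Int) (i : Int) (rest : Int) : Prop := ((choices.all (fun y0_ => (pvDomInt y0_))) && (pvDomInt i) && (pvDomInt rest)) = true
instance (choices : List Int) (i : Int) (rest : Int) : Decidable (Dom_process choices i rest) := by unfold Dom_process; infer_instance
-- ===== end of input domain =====

-- B replaces A's top-down double recursion by one forward sweep keeping a dict from
-- each reachable remaining amount to the fewest coins used (a different algorithm of
-- the same worst-case cost).

-- ===== PORT A =====
-- literal transliteration of A's plain double recursion; the Nat fuel only makes the
-- recursion structurally total (it always exceeds the remaining depth (len - i) on the
-- inputs Pre_process admits, so the fuel-0 arm is never reached there); where Python A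
-- raises (choices[i] IndexError, or endless recursion past len(choices)) the port
-- returns -1, and Pre_process excludes exactly those inputs.
def processGo (choices : List Int) (fuel : Nat) (i : Int) (rest : Int) : Int :=
  match fuel with
  | 0 => -1   -- unreachable: the fuel passed in `process` exceeds the recursion depth
  | Nat.succ f =>
    if rest < 0 then -1
    else if rest = 0 then 0
    else if i = (choices.length : Int) then -1
    else
      match PySem.List.pyGet? choices i with
      | none => -1   -- Python raises IndexError here (excluded by Pre_process)
      | some c =>
        let no := processGo choices f (i + 1) rest
        let yes := processGo choices f (i + 1) (rest - c)
        if yes = -1 ∧ no = -1 then -1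
        else if yes = -1 then no
        else if no = -1 then yes + 1
        else min (1 + yes) no

def process (choices : List Int) (i : Int) (rest : Int) : Int :=
  processGo choices (((choices.length : Int) - i).toNat + 1) i rest

-- ===== PORT B =====
-- the body of Source B's inner `for r, k in states.items()` loop: acc = (best, new dict)
def altStep (c : Int) (acc : Int × PySem.Dict Int Int) (e : Int × Int) : Int × PySem.Dict Int Int :=
  let nr := e.1 - c
  if nr < 0 then acc
  else if nr = 0 then
    (if acc.1 = -1 ∨ e.2 + 1 < acc.1 then (e.2 + 1, acc.2) else acc)
  else
    match acc.2.get? nr with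
    | none => (acc.1, acc.2.insert nr (e.2 + 1))
    | some v => (acc.1, acc.2.insert nr (min v (e.2 + 1)))

-- Source B's `while j < n` sweep; the fuel is the exact iteration count (n - j)
def altLoop (choices : List Int) (fuel : Nat) (j : Int) (best : Int)
    (states : PySem.Dict Int Int) : Int :=
  match fuel with
  | 0 => best
  | Nat.succ f =>
    match PySem.List.pyGet? choices j with
    | none => best   -- Python raises IndexError here (excluded by Pre_process)
    | some c =>
      let res := states.items.foldl (altStep c) (best, states)
      altLoop choices f (j + 1) res.1 res.2

def process_alt (choices : List Int) (i : Int) (rest : Int) : Int :=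
  if rest < 0 then -1
  else if rest = 0 then 0
  else altLoop choices (((choices.length : Int) - i).toNat) i (-1)
    (PySem.Dict.empty.insert rest 0)

-- ===== PRECONDITION & SPEC =====
-- Pre_ excludes exactly the inputs where Python A does not return: rest > 0 with
-- i > len(choices) (IndexError on choices[i]) or i < -len(choices) (IndexError too,
-- after negative-index wraparound fails).
def Pre_process (choices : List Int) (i : Int) (rest : Int) : Prop :=
  rest ≤ 0 ∨ (-(choices.length : Int) ≤ i ∧ i ≤ (choices.length : Int))
instance (choices : List Int) (i : Int) (rest : Int) : Decidable (Pre_process choices i rest) := by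
  unfold Pre_process; infer_instance
def pvWitness_process : List Int × Int × Int := ([1, 2, 3], 0, 4)

def Spec_process (choices : List Int) (i : Int) (rest : Int) (out : Int) : Prop := out = process_alt choices i rest
instance (choices : List Int) (i : Int) (rest : Int) (out : Int) : Decidable (Spec_process choices i rest out) := by unfold Spec_process; infer_instance

-- ===== CLAIM (what is proved, stated in full; the proofs are below) =====
def Claim_equal_process : Prop := ∀ (choices : List Int) (i : Int) (rest : Int), Dom_process choices i rest → Pre_process choices i rest → Spec_process choices i rest (process choices i rest)

-- ===== LEMMAS AND PROOFS =====

-- `vmin` is min with -1 read as +infinity; `addInf k v` is k + v with -1 absorbed.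
def vmin (a b : Int) : Int := if a = -1 then b else if b = -1 then a else min a b
def addInf (k v : Int) : Int := if v = -1 then -1 else k + v
-- value a state entry (remaining, used) contributes when the sweep stands at index j
def gval (choices : List Int) (j : Int) (e : Int × Int) : Int :=
  addInf e.2 (process choices j e.1)
-- vmin-fold of f over a list of entries (the "minimum over all open states")
def Msum (f : Int × Int → Int) (l : List (Int × Int)) : Int :=
  l.foldl (fun a e => vmin a (f e)) (-1)

theorem vmin_neg_one_left (b : Int) : vmin (-1) b = b := by unfold vmin; simp

theorem vmin_neg_one_right (a : Int) : vmin a (-1) = a := by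
  unfold vmin; split_ifs <;> omega

theorem vmin_comm (a b : Int) : vmin a b = vmin b a := by
  unfold vmin; split_ifs <;> omega

theorem vmin_assoc (a b c : Int) : vmin (vmin a b) c = vmin a (vmin b c) := by
  unfold vmin; split_ifs <;> omega

theorem foldl_vmin_init (f : Int × Int → Int) (l : List (Int × Int)) (b : Int) :
    l.foldl (fun a e => vmin a (f e)) b = vmin b (Msum f l) := by
  induction l generalizing b with
  | nil => simp [Msum, vmin_neg_one_right]
  | cons e t ih =>
    unfold Msum
    simp only [List.foldl_cons]
    rw [ih, ih (vmin (-1) (f e)), vmin_neg_one_left, vmin_assoc]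

theorem Msum_cons (f : Int × Int → Int) (e : Int × Int) (l : List (Int × Int)) :
    Msum f (e :: l) = vmin (f e) (Msum f l) := by
  unfold Msum
  simp only [List.foldl_cons]
  rw [foldl_vmin_init, vmin_neg_one_left]
  rfl

theorem Msum_append (f : Int × Int → Int) (l₁ l₂ : List (Int × Int)) :
    Msum f (l₁ ++ l₂) = vmin (Msum f l₁) (Msum f l₂) := by
  unfold Msum
  rw [List.foldl_append, foldl_vmin_init]
  rfl

theorem Msum_congr (f g : Int × Int → Int) (l : List (Int × Int))
    (h : ∀ e ∈ l, f e = g e) : Msum f l = Msum g l := by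
  induction l with
  | nil => rfl
  | cons e t ih =>
    rw [Msum_cons, Msum_cons, h e (by simp), ih (fun x hx => h x (by simp [hx]))]

theorem Msum_combine (f g : Int × Int → Int) (l : List (Int × Int)) :
    Msum (fun e => vmin (f e) (g e)) l = vmin (Msum f l) (Msum g l) := by
  induction l with
  | nil => simp [Msum, vmin_neg_one_right]
  | cons e t ih =>
    rw [Msum_cons, Msum_cons, Msum_cons, ih]
    rw [vmin_assoc, vmin_assoc]
    congr 1
    rw [← vmin_assoc, ← vmin_assoc, vmin_comm (Msum f t) (g e)]

theorem Msum_neg_one (f : Int × Int → Int) (l : List (Int × Int))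
    (h : ∀ e ∈ l, f e = -1) : Msum f l = -1 := by
  induction l with
  | nil => rfl
  | cons e t ih =>
    rw [Msum_cons, h e (by simp), vmin_neg_one_left, ih (fun x hx => h x (by simp [hx]))]

theorem addInf_zero (v : Int) : addInf 0 v = v := by
  unfold addInf; split_ifs with h <;> omega

theorem addInf_vmin (k a b : Int) (hk : 0 ≤ k)
    (ha : a = -1 ∨ 0 ≤ a) (hb : b = -1 ∨ 0 ≤ b) :
    addInf k (vmin a b) = vmin (addInf k a) (addInf k b) := by
  rcases ha with ha | ha <;> rcases hb with hb | hb <;> unfold addInf vmin <;>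
    split_ifs <;> omega

theorem addInf_addInf (k₁ k₂ v : Int) (hk₂ : 0 ≤ k₂) (hv : v = -1 ∨ 0 ≤ v) :
    addInf k₁ (addInf k₂ v) = addInf (k₁ + k₂) v := by
  rcases hv with hv | hv <;> unfold addInf <;> split_ifs <;> omega

theorem addInf_min (k₁ k₂ v : Int) (h1 : 0 ≤ k₁) (h2 : 0 ≤ k₂)
    (hv : v = -1 ∨ 0 ≤ v) :
    addInf (min k₁ k₂) v = vmin (addInf k₁ v) (addInf k₂ v) := by
  rcases hv with hv | hv <;> unfold addInf vmin <;> split_ifs <;> omega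

theorem pvIdxLt {α : Type} (xs : List α) (i : Int) (c : α)
    (h : PySem.List.pyGet? xs i = some c) : i < (xs.length : Int) := by
  by_contra hn
  have hr : ¬ PySem.Raise.InRange xs.length i := fun hr => hn hr.2
  rw [← PySem.List.pyGet?_eq_none_iff] at hr
  rw [h] at hr
  cases hr

-- enough fuel ⇒ the fuel amount is irrelevant
theorem processGo_fuel (choices : List Int) :
    ∀ (f1 f2 : Nat) (i rest : Int),
      ((choices.length : Int) - i).toNat < f1 → ((choices.length : Int) - i).toNat < f2 →
      processGo choices f1 i rest = processGo choices f2 i rest := by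
  intro f1
  induction f1 with
  | zero => intro f2 i rest h1 _; omega
  | succ g1 ih =>
    intro f2 i rest h1 h2
    match f2 with
    | 0 => omega
    | Nat.succ g2 =>
      simp only [processGo]
      by_cases hr0 : rest < 0
      · simp only [if_pos hr0]
      simp only [if_neg hr0]
      by_cases hre : rest = 0
      · simp only [if_pos hre]
      simp only [if_neg hre]
      by_cases hl : i = (choices.length : Int)
      · simp only [if_pos hl]
      simp only [if_neg hl]
      cases hg : PySem.List.pyGet? choices i with
      | none => rfl
      | some c =>
        have hlt := pvIdxLt choices i c hg
        have ha := ih g2 (i + 1) rest (by omega) (by omega)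
        have hb := ih g2 (i + 1) (rest - c) (by omega) (by omega)
        simp only [ha, hb]

-- one-step unfolding of `process` in the recursive branch
theorem process_eq_some (choices : List Int) (i rest c : Int)
    (h1 : ¬ rest < 0) (h2 : ¬ rest = 0) (h3 : ¬ i = (choices.length : Int))
    (hc : PySem.List.pyGet? choices i = some c) :
    process choices i rest =
      (if process choices (i + 1) (rest - c) = -1 ∧ process choices (i + 1) rest = -1 then -1
       else if process choices (i + 1) (rest - c) = -1 then process choices (i + 1) rest
       else if process choices (i + 1) rest = -1 then process choices (i + 1) (rest - c) + 1
       else min (1 + process choices (i + 1) (rest - c)) (process choices (i + 1) rest)) := by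
  have hlt := pvIdxLt choices i c hc
  have e : ∀ (j r : Int), process choices j r
      = processGo choices (((choices.length : Int) - j).toNat + 1) j r := fun _ _ => rfl
  have ha : processGo choices ((choices.length : Int) - i).toNat (i + 1) rest
      = process choices (i + 1) rest := by
    rw [e]
    exact processGo_fuel choices _ _ _ _ (by omega) (by omega)
  have hb : processGo choices ((choices.length : Int) - i).toNat (i + 1) (rest - c)
      = process choices (i + 1) (rest - c) := by
    rw [e]
    exact processGo_fuel choices _ _ _ _ (by omega) (by omega)
  rw [e i rest]
  simp only [processGo, if_neg h1, if_neg h2, if_neg h3, hc]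
  rw [ha, hb]

-- process takes values in {-1} ∪ [0, ∞)
theorem process_cases (choices : List Int) (j r : Int) :
    process choices j r = -1 ∨ 0 ≤ process choices j r := by
  unfold process
  generalize (((choices.length : Int) - j).toNat + 1) = fuel
  induction fuel generalizing j r with
  | zero => simp [processGo]
  | succ f ih =>
    simp only [processGo]
    by_cases h1 : r < 0
    · left; rw [if_pos h1]
    by_cases h2 : r = 0
    · right; rw [if_neg h1, if_pos h2]
    by_cases h3 : j = (choices.length : Int)
    · left; rw [if_neg h1, if_neg h2, if_pos h3]
    simp only [if_neg h1, if_neg h2, if_neg h3]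
    cases hg : PySem.List.pyGet? choices j with
    | none => left; rfl
    | some c =>
      simp only
      have hn := ih (j + 1) r
      have hy := ih (j + 1) (r - c)
      split_ifs <;> omega

theorem process_neg (choices : List Int) (j r : Int) (h : r < 0) :
    process choices j r = -1 := by
  unfold process; simp only [processGo, if_pos h]

theorem process_zero (choices : List Int) (j : Int) :
    process choices j 0 = 0 := by
  unfold process; simp [processGo]

theorem process_out (choices : List Int) (j r : Int) (hr : 0 < r)
    (hj : (choices.length : Int) ≤ j) : process choices j r = -1 := by
  unfold process
  simp only [processGo, if_neg (show ¬ r < 0 by omega), if_neg (show ¬ r = 0 by omega)]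
  by_cases hl : j = (choices.length : Int)
  · simp only [if_pos hl]
  · simp only [if_neg hl]
    have hg : PySem.List.pyGet? choices j = none := by
      rw [PySem.List.pyGet?_eq_none_iff]
      intro hin
      exact hl (by have := hin.2; omega)
    simp [hg]

-- A's four-branch combination IS vmin/addInf
theorem process_step_vmin (choices : List Int) (j r c : Int) (hr : 0 < r)
    (hj : ¬ j = (choices.length : Int)) (hc : PySem.List.pyGet? choices j = some c) :
    process choices j r =
      vmin (process choices (j + 1) r)
           (addInf 1 (process choices (j + 1) (r - c))) := by
  rw [process_eq_some choices j r c (by omega) (by omega) hj hc]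
  have hn := process_cases choices (j + 1) r
  have hy := process_cases choices (j + 1) (r - c)
  unfold vmin addInf
  split_ifs <;> omega

-- entry-wise: the value of a state at j equals vmin of its "no" value at j+1 and
-- its "yes" contribution (one more coin, r - c remaining)
theorem gval_step (choices : List Int) (j c : Int) (e : Int × Int)
    (hr : 0 < e.1) (hk : 0 ≤ e.2)
    (hj : ¬ j = (choices.length : Int)) (hc : PySem.List.pyGet? choices j = some c) :
    gval choices j e =
      vmin (gval choices (j + 1) e)
           (addInf (e.2 + 1) (process choices (j + 1) (e.1 - c))) := by
  unfold gval
  rw [process_step_vmin choices j e.1 c hr hj hc]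
  rw [addInf_vmin e.2 _ _ hk (process_cases choices (j + 1) e.1)
    (by have := process_cases choices (j + 1) (e.1 - c); unfold addInf; split_ifs <;> omega)]
  rw [addInf_addInf e.2 1 _ (by omega) (process_cases choices (j + 1) (e.1 - c))]

-- well-formed state dicts: keys distinct, remainders positive, counts nonnegative
def WFD (d : PySem.Dict Int Int) : Prop :=
  d.keys.Nodup ∧ ∀ e ∈ d.items, 0 < e.1 ∧ 0 ≤ e.2

-- inserting the min count for a key changes the Msum of gval by exactly vmin with
-- the new contribution
theorem Msum_insert_none (f : Int × Int → Int) (d : PySem.Dict Int Int) (nr w : Int)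
    (hget : d.get? nr = none) :
    Msum f (d.insert nr w).items = vmin (Msum f d.items) (f (nr, w)) := by
  have hc : d.contains nr = false := by
    rw [PySem.Dict.contains_eq_isSome_get?, hget]; rfl
  rw [PySem.Dict.items_insert_of_not_contains d w hc, Msum_append, Msum_cons]
  rw [show Msum f [] = -1 from rfl, vmin_neg_one_right]

theorem vmin_shuffle1 (a b c y : Int) :
    vmin a (vmin (vmin b y) c) = vmin (vmin a (vmin b c)) y := by
  unfold vmin; split_ifs <;> omega

-- overwriting key nr (present with value v) by w, where f (nr, w) = vmin (f (nr, v)) y,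
-- adds exactly y to the Msum
theorem Msum_insert_min (f : Int × Int → Int) (d : PySem.Dict Int Int) (nr v w y : Int)
    (hnd : d.keys.Nodup) (hget : d.get? nr = some v)
    (hfw : f (nr, w) = vmin (f (nr, v)) y) :
    Msum f (d.insert nr w).items = vmin (Msum f d.items) y := by
  have hmem : (nr, v) ∈ d.items := PySem.Dict.mem_items_of_get?_eq_some d hget
  obtain ⟨l₁, l₂, hsplit⟩ := List.append_of_mem hmem
  have hcontains : d.contains nr = true := by
    rw [PySem.Dict.contains_eq_isSome_get?, hget]; rfl
  have hkeys : ((l₁ ++ (nr, v) :: l₂).map Prod.fst).Nodup := by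
    have : d.keys = d.items.map Prod.fst := rfl
    rw [this, hsplit] at hnd
    exact hnd
  rw [List.map_append, List.map_cons] at hkeys
  have hd := List.nodup_append.mp hkeys
  have h1 : ∀ p ∈ l₁, p.1 ≠ nr := by
    intro p hp heq
    exact hd.2.2 p.1 (List.mem_map_of_mem hp) nr (by simp) heq
  have h2 : ∀ p ∈ l₂, p.1 ≠ nr := by
    intro p hp heq
    apply (List.nodup_cons.mp hd.2.1).1
    have hm := List.mem_map_of_mem (f := Prod.fst) hp
    rw [heq] at hm
    exact hm
  rw [PySem.Dict.items_insert_of_contains d w hcontains, hsplit]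
  have hmap : (l₁ ++ (nr, v) :: l₂).map (fun p => if p.1 == nr then (nr, w) else p)
      = l₁ ++ (nr, w) :: l₂ := by
    rw [List.map_append, List.map_cons]
    congr 1
    · calc l₁.map (fun p => if p.1 == nr then (nr, w) else p)
          = l₁.map id := List.map_congr_left (fun p hp => by
            simp [beq_iff_eq, h1 p hp])
        _ = l₁ := List.map_id l₁
    · congr 1
      · simp
      · calc l₂.map (fun p => if p.1 == nr then (nr, w) else p)
            = l₂.map id := List.map_congr_left (fun p hp => by
              simp [beq_iff_eq, h2 p hp])
          _ = l₂ := List.map_id l₂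
  rw [hmap, Msum_append, Msum_append, Msum_cons, Msum_cons, hfw]
  exact vmin_shuffle1 _ _ _ _

theorem vmin_shuffle2 (a k m s : Int) :
    vmin (vmin (vmin a k) m) s = vmin (vmin a m) (vmin k s) := by
  unfold vmin; split_ifs <;> omega

theorem vmin_shuffle3 (a m y s : Int) :
    vmin (vmin a (vmin m y)) s = vmin (vmin a m) (vmin y s) := by
  unfold vmin; split_ifs <;> omega

theorem vmin_range (a b : Int) (ha : a = -1 ∨ 0 ≤ a) (hb : b = -1 ∨ 0 ≤ b) :
    vmin a b = -1 ∨ 0 ≤ vmin a b := by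
  rcases ha with ha | ha <;> rcases hb with hb | hb <;> unfold vmin <;>
    split_ifs <;> omega

-- the inner `for r, k in states.items()` loop adds exactly the "yes" contributions
-- of the processed entries to best/new, measured through Msum of gval at j + 1
theorem fold_step (choices : List Int) (j c : Int) :
    ∀ (S : List (Int × Int)) (b : Int) (d : PySem.Dict Int Int),
      d.keys.Nodup → (∀ e ∈ d.items, 0 < e.1 ∧ 0 ≤ e.2) →
      (∀ e ∈ S, 0 < e.1 ∧ 0 ≤ e.2) → (b = -1 ∨ 0 ≤ b) →
      (vmin (S.foldl (altStep c) (b, d)).1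
           (Msum (gval choices (j + 1)) (S.foldl (altStep c) (b, d)).2.items)
        = vmin (vmin b (Msum (gval choices (j + 1)) d.items))
               (Msum (fun e => addInf (e.2 + 1) (process choices (j + 1) (e.1 - c))) S))
      ∧ (S.foldl (altStep c) (b, d)).2.keys.Nodup
      ∧ (∀ e ∈ (S.foldl (altStep c) (b, d)).2.items, 0 < e.1 ∧ 0 ≤ e.2)
      ∧ ((S.foldl (altStep c) (b, d)).1 = -1 ∨ 0 ≤ (S.foldl (altStep c) (b, d)).1) := by
  intro S
  induction S with
  | nil =>
    intro b d hnd hitems _ hb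
    refine ⟨?_, hnd, hitems, hb⟩
    simp only [List.foldl_nil]
    rw [show Msum (fun e => addInf (e.2 + 1) (process choices (j + 1) (e.1 - c))) [] = -1
      from rfl, vmin_neg_one_right]
  | cons e S ih =>
    intro b d hnd hitems hS hb
    have heS : 0 < e.1 ∧ 0 ≤ e.2 := hS e (by simp)
    have hS' : ∀ x ∈ S, 0 < x.1 ∧ 0 ≤ x.2 := fun x hx => hS x (by simp [hx])
    simp only [List.foldl_cons]
    rw [Msum_cons]
    by_cases hneg : e.1 - c < 0
    · have hstep : altStep c (b, d) e = (b, d) := by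
        simp only [altStep, if_pos hneg]
      rw [hstep]
      have hyes : addInf (e.2 + 1) (process choices (j + 1) (e.1 - c)) = -1 := by
        rw [process_neg choices (j + 1) (e.1 - c) hneg]
        rfl
      rw [hyes, vmin_neg_one_left]
      exact ih b d hnd hitems hS' hb
    by_cases hzer : e.1 - c = 0
    · have hstep : altStep c (b, d) e = (vmin b (e.2 + 1), d) := by
        simp only [altStep, if_neg hneg, if_pos hzer]
        have hfst : vmin b (e.2 + 1) = if b = -1 ∨ e.2 + 1 < b then e.2 + 1 else b := by
          have hk2 := heS.2
          unfold vmin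
          split_ifs <;> omega
        rw [hfst]
        split_ifs <;> rfl
      rw [hstep]
      have hyes : addInf (e.2 + 1) (process choices (j + 1) (e.1 - c)) = e.2 + 1 := by
        rw [hzer, process_zero]
        have hk2 := heS.2
        unfold addInf
        norm_num
      have hb' : vmin b (e.2 + 1) = -1 ∨ 0 ≤ vmin b (e.2 + 1) :=
        vmin_range b (e.2 + 1) hb (Or.inr (by omega))
      obtain ⟨h1, h2, h3, h4⟩ := ih (vmin b (e.2 + 1)) d hnd hitems hS' hb'
      refine ⟨?_, h2, h3, h4⟩
      rw [h1, hyes, vmin_shuffle2]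
    · -- nr > 0: insert min count for key e.1 - c
      have hpos : 0 < e.1 - c := by omega
      have hyesg : gval choices (j + 1) (e.1 - c, e.2 + 1)
          = addInf (e.2 + 1) (process choices (j + 1) (e.1 - c)) := rfl
      have key : ∃ d' : PySem.Dict Int Int, altStep c (b, d) e = (b, d') ∧
          Msum (gval choices (j + 1)) d'.items
            = vmin (Msum (gval choices (j + 1)) d.items)
                   (addInf (e.2 + 1) (process choices (j + 1) (e.1 - c))) ∧
          d'.keys.Nodup ∧ (∀ x ∈ d'.items, 0 < x.1 ∧ 0 ≤ x.2) := by
        cases hget : d.get? (e.1 - c) with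
        | none =>
          refine ⟨d.insert (e.1 - c) (e.2 + 1), ?_, ?_, ?_, ?_⟩
          · simp only [altStep, if_neg hneg, if_neg hzer, hget]
          · rw [Msum_insert_none _ d _ _ hget, hyesg]
          · exact PySem.Dict.nodup_keys_insert d _ _ hnd
          · intro x hx
            rcases (PySem.Dict.mem_items_insert d _ _ x).mp hx with hx | hx
            · subst hx; exact ⟨hpos, by omega⟩
            · exact hitems x hx.1
        | some v =>
          have hv : 0 ≤ v :=
            (hitems _ (PySem.Dict.mem_items_of_get?_eq_some d hget)).2
          refine ⟨d.insert (e.1 - c) (min v (e.2 + 1)), ?_, ?_, ?_, ?_⟩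
          · simp only [altStep, if_neg hneg, if_neg hzer, hget]
          · have hfw : gval choices (j + 1) (e.1 - c, min v (e.2 + 1))
                = vmin (gval choices (j + 1) (e.1 - c, v))
                       (addInf (e.2 + 1) (process choices (j + 1) (e.1 - c))) :=
              addInf_min v (e.2 + 1) _ hv (by omega)
                (process_cases choices (j + 1) (e.1 - c))
            rw [Msum_insert_min (gval choices (j + 1)) d (e.1 - c) v (min v (e.2 + 1))
              _ hnd hget hfw]
          · exact PySem.Dict.nodup_keys_insert d _ _ hnd
          · intro x hx
            rcases (PySem.Dict.mem_items_insert d _ _ x).mp hx with hx | hx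
            · subst hx; exact ⟨hpos, by omega⟩
            · exact hitems x hx.1
      obtain ⟨d', hstep, hF, hnd', hit'⟩ := key
      rw [hstep]
      obtain ⟨h1, h2, h3, h4⟩ := ih b d' hnd' hit' hS' hb
      refine ⟨?_, h2, h3, h4⟩
      rw [h1, hF, vmin_shuffle3]

-- the outer sweep computes vmin of best and all open-state values
theorem altLoop_inv (choices : List Int) :
    ∀ (fuel : Nat) (j best : Int) (states : PySem.Dict Int Int),
      ((choices.length : Int) - j).toNat = fuel → -(choices.length : Int) ≤ j →
      states.keys.Nodup → (∀ e ∈ states.items, 0 < e.1 ∧ 0 ≤ e.2) →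
      (best = -1 ∨ 0 ≤ best) →
      altLoop choices fuel j best states
        = vmin best (Msum (gval choices j) states.items) := by
  intro fuel
  induction fuel with
  | zero =>
    intro j best states hf hj hnd hitems hb
    have hge : (choices.length : Int) ≤ j := by omega
    have : Msum (gval choices j) states.items = -1 := by
      apply Msum_neg_one
      intro e he
      unfold gval
      rw [process_out choices j e.1 (hitems e he).1 hge]
      rfl
    rw [this, vmin_neg_one_right]
    rfl
  | succ f ih =>
    intro j best states hf hj hnd hitems hb
    have hjlt : j < (choices.length : Int) := by omega
    cases hg : PySem.List.pyGet? choices j with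
    | none =>
      exfalso
      exact ((PySem.List.pyGet?_eq_none_iff choices j).mp hg) ⟨hj, hjlt⟩
    | some c =>
      have hjne : ¬ j = (choices.length : Int) := by omega
      simp only [altLoop, hg]
      obtain ⟨h1, h2, h3, h4⟩ := fold_step choices j c states.items best states
        hnd hitems hitems hb
      rw [ih (j + 1) _ _ (by omega) (by omega) h2 h3 h4, h1, vmin_assoc,
        ← Msum_combine]
      congr 1
      apply Msum_congr
      intro e he
      exact (gval_step choices j c e (hitems e he).1 (hitems e he).2 hjne hg).symm

-- ===== VERDICT (by name: the statements are the Claim_ definitions above) =====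
theorem process_spec : Claim_equal_process := by
  intro choices i rest _ hpre
  unfold Spec_process process_alt
  by_cases h1 : rest < 0
  · rw [if_pos h1, process_neg choices i rest h1]
  by_cases h2 : rest = 0
  · rw [if_neg h1, if_pos h2, h2, process_zero]
  rw [if_neg h1, if_neg h2]
  have hpre' : -(choices.length : Int) ≤ i ∧ i ≤ (choices.length : Int) := by
    rcases hpre with h | h
    · omega
    · exact h
  rw [altLoop_inv choices (((choices.length : Int) - i).toNat) i (-1)
    (PySem.Dict.empty.insert rest 0) rfl hpre'.1
    (PySem.Dict.nodup_keys_insert _ _ _ PySem.Dict.nodup_keys_empty)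
    (by
      intro e he
      rw [show (PySem.Dict.empty.insert rest (0 : Int)).items = [(rest, 0)] from rfl] at he
      simp only [List.mem_singleton] at he
      subst he
      exact ⟨by omega, by omega⟩)
    (Or.inl rfl)]
  rw [show (PySem.Dict.empty.insert rest (0 : Int)).items = [(rest, 0)] from rfl]
  rw [Msum_cons, show Msum (gval choices i) [] = -1 from rfl, vmin_neg_one_right,
    vmin_neg_one_left]
  unfold gval
  rw [addInf_zero]
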